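-- pv_equiv track=rewrite | github.com/Ege-Cakar/Automated-Risk-Assessment | src/utils/db_loader.py | _find_sentence_break
-- ===== SOURCE A (Python) =====
-- def _find_sentence_break(text: str, start: int, end: int) -> int:
--     """Find a good place to break text (sentence ending)"""
--     # Look for sentence endings (., !, ?)
--     for i in range(end - 1, start - 1, -1):
--         if text[i] in '.!?' and i + 1 < len(text) and text[i + 1].isspace():
--             return i + 1
--
--     # Look for paragraph breaks
--     for i in range(end - 1, start - 1, -1):
--         if text[i] == '\n' and i + 1 < len(text) and text[i + 1] in '\n\r':
--             return i + 1
--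
--     # Look for any line break
--     for i in range(end - 1, start - 1, -1):
--         if text[i] == '\n':
--             return i + 1
--
--     # If no good break found, return original end
--     return end
-- ===== SOURCE B (Python) =====
-- def _find_sentence_break(text: str, start: int, end: int) -> int:
--     """Find a good place to break text (sentence ending) -- single backward pass."""
--     n = len(text)
--     para = None
--     line = None
--     for i in range(end - 1, start - 1, -1):
--         c = text[i]
--         if c in '.!?' and i + 1 < n and text[i + 1].isspace():
--             return i + 1
--         if para is None and c == '\n' and i + 1 < n and text[i + 1] in '\n\r':
--             para = i + 1
--         if line is None and c == '\n':
--             line = i + 1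
--     if para is not None:
--         return para
--     if line is not None:
--         return line
--     return end
-- ===== Notes on version B (the rewrite author's own statement) =====
-- stated objective: alternative
-- what changed: A makes up to three separate backward scans over the window (one per break tier); B makes a single backward pass that early-returns on a sentence ending and otherwise records the first backward paragraph-break and line-break candidates, picking among them at the end.
-- outside the precondition, e.g. on _find_sentence_break('a. b', -10, 3): A returns 2, B returns 2
import Mathlib
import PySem

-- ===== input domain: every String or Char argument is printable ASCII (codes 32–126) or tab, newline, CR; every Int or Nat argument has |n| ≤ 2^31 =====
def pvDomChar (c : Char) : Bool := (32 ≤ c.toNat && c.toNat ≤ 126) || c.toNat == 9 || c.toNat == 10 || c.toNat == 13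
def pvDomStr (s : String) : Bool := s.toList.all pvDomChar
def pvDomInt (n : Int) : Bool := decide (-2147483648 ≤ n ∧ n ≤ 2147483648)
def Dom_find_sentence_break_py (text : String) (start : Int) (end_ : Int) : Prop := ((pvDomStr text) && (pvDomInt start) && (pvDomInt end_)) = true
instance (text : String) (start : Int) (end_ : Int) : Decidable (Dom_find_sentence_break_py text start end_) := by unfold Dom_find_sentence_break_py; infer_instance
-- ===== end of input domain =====

-- B replaces A's three backward scans by one backward pass keeping per-tier candidates (objective: alternative, same asymptotic cost).
-- Both loops iterate i over range(end-1, start-1, -1) lazily, as Python does: i counts down from end_-1,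
-- fuel = (end_-start).toNat is the number of iterations; 'text[i]' is pyGet?, and where it is none
-- Python raises IndexError (outside Pre_), so the loop stops there and nothing is claimed.

-- ===== PORT A =====
-- A's first loop: return i+1 at the first backward sentence ending.
def pvA1 (cs : List Char) (i : Int) : Nat → Option Int
  | 0 => none
  | fuel + 1 =>
    match PySem.List.pyGet? cs i with
    | none => none   -- Python: IndexError (outside Pre_)
    | some c =>
      if (c == '.' || c == '!' || c == '?') && decide (i + 1 < (cs.length : Int))
          && PySem.Chars.isspace (PySem.List.pyGetD cs (i + 1) ' ')
      then some (i + 1) else pvA1 cs (i - 1) fuel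

-- A's second loop: paragraph break.
def pvA2 (cs : List Char) (i : Int) : Nat → Option Int
  | 0 => none
  | fuel + 1 =>
    match PySem.List.pyGet? cs i with
    | none => none   -- Python: IndexError (outside Pre_)
    | some c =>
      if (c == '\n') && decide (i + 1 < (cs.length : Int))
          && (PySem.List.pyGetD cs (i + 1) ' ' == '\n' || PySem.List.pyGetD cs (i + 1) ' ' == '\r')
      then some (i + 1) else pvA2 cs (i - 1) fuel

-- A's third loop: any line break.
def pvA3 (cs : List Char) (i : Int) : Nat → Option Int
  | 0 => none
  | fuel + 1 =>
    match PySem.List.pyGet? cs i with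
    | none => none   -- Python: IndexError (outside Pre_)
    | some c => if c == '\n' then some (i + 1) else pvA3 cs (i - 1) fuel

def find_sentence_break_py (text : String) (start : Int) (end_ : Int) : Int :=
  let cs := text.toList
  let fuel := (end_ - start).toNat
  match pvA1 cs (end_ - 1) fuel with
  | some r => r
  | none =>
    match pvA2 cs (end_ - 1) fuel with
    | some r => r
    | none =>
      match pvA3 cs (end_ - 1) fuel with
      | some r => r
      | none => end_

-- ===== PORT B =====
-- B's fall-through after the pass: para if set, else line if set, else end.
def pvBfin (para line : Option Int) (e : Int) : Int :=
  match para with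
  | some p => p
  | none =>
    match line with
    | some l => l
    | none => e

-- B's single backward pass: early return on a sentence ending, otherwise remember the
-- first backward paragraph-break and line-break candidates.
def pvBloop (cs : List Char) (i : Int) (fuel : Nat) (para line : Option Int) (e : Int) : Int :=
  match fuel with
  | 0 => pvBfin para line e
  | fuel + 1 =>
    match PySem.List.pyGet? cs i with
    | none => pvBfin para line e   -- Python: IndexError (outside Pre_)
    | some c =>
      if (c == '.' || c == '!' || c == '?') && decide (i + 1 < (cs.length : Int))
          && PySem.Chars.isspace (PySem.List.pyGetD cs (i + 1) ' ')
      then i + 1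
      else
        let para' := if para == none && (c == '\n') && decide (i + 1 < (cs.length : Int))
            && (PySem.List.pyGetD cs (i + 1) ' ' == '\n' || PySem.List.pyGetD cs (i + 1) ' ' == '\r')
                     then some (i + 1) else para
        let line' := if line == none && (c == '\n') then some (i + 1) else line
        pvBloop cs (i - 1) fuel para' line' e

def find_sentence_break_py_alt (text : String) (start : Int) (end_ : Int) : Int :=
  pvBloop text.toList (end_ - 1) (end_ - start).toNat none none end_

-- ===== PRECONDITION & SPEC =====
-- Pre_ excludes inputs on which the backward scan visits an index outside [-len, len): Python A
-- raises IndexError there, except when an earlier (higher-index) sentence hit returns first —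
-- and on those excluded returning inputs B returns the same value anyway (see cites).
def Pre_find_sentence_break_py (text : String) (start : Int) (end_ : Int) : Prop :=
  end_ ≤ start ∨ (-(text.toList.length : Int) ≤ start ∧ end_ ≤ (text.toList.length : Int))
instance (text : String) (start : Int) (end_ : Int) : Decidable (Pre_find_sentence_break_py text start end_) := by unfold Pre_find_sentence_break_py; infer_instance

def pvWitness_find_sentence_break_py : String × Int × Int := ("a. b\nc", 0, 6)

def Spec_find_sentence_break_py (text : String) (start : Int) (end_ : Int) (out : Int) : Prop := out = find_sentence_break_py_alt text start end_
instance (text : String) (start : Int) (end_ : Int) (out : Int) : Decidable (Spec_find_sentence_break_py text start end_ out) := by unfold Spec_find_sentence_break_py; infer_instance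

-- ===== CLAIM (what is proved, stated in full; the proofs are below) =====
def Claim_equal_find_sentence_break_py : Prop := ∀ (text : String) (start : Int) (end_ : Int), Dom_find_sentence_break_py text start end_ → Pre_find_sentence_break_py text start end_ → Spec_find_sentence_break_py text start end_ (find_sentence_break_py text start end_)

-- ===== LEMMAS AND PROOFS =====
-- Invariant of B's pass: it returns A's first-loop hit if any; otherwise the para
-- accumulator (or A's second-loop hit), else the line accumulator (or A's third-loop hit), else e.
-- (All four loops stop at the same out-of-range index, so the equation is unconditional.)
lemma pvBloop_eq (cs : List Char) : ∀ (fuel : Nat) (i : Int) (para line : Option Int) (e : Int),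
    pvBloop cs i fuel para line e =
      match pvA1 cs i fuel with
      | some r => r
      | none => ((para.or (pvA2 cs i fuel)).getD ((line.or (pvA3 cs i fuel)).getD e)) := by
  intro fuel
  induction fuel with
  | zero =>
    intro i para line e
    cases para <;> cases line <;> simp [pvBloop, pvBfin, pvA1, pvA2, pvA3]
  | succ fuel ih =>
    intro i para line e
    cases hg : PySem.List.pyGet? cs i with
    | none =>
      cases para <;> cases line <;> simp [pvBloop, pvBfin, pvA1, pvA2, pvA3, hg]
    | some c =>
      by_cases hs : ((c == '.' || c == '!' || c == '?') && decide (i + 1 < (cs.length : Int))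
          && PySem.Chars.isspace (PySem.List.pyGetD cs (i + 1) ' ')) = true
      · simp [pvBloop, pvA1, hg, hs]
      · rw [show pvBloop cs i (fuel + 1) para line e = pvBloop cs (i - 1) fuel
          (if para == none && (c == '\n') && decide (i + 1 < (cs.length : Int))
              && (PySem.List.pyGetD cs (i + 1) ' ' == '\n' || PySem.List.pyGetD cs (i + 1) ' ' == '\r')
           then some (i + 1) else para)
          (if line == none && (c == '\n') then some (i + 1) else line) e
          from by simp [pvBloop, hg, hs]]
        rw [ih]
        rw [show pvA1 cs i (fuel + 1) = pvA1 cs (i - 1) fuel from by simp [pvA1, hg, hs]]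
        cases hA1 : pvA1 cs (i - 1) fuel with
        | some r => simp
        | none =>
          simp only []
          congr 1
          · -- para side
            cases para with
            | some p => simp
            | none =>
              by_cases hp : ((c == '\n') && decide (i + 1 < (cs.length : Int))
                  && (PySem.List.pyGetD cs (i + 1) ' ' == '\n' || PySem.List.pyGetD cs (i + 1) ' ' == '\r')) = true
              <;> simp [pvA2, hg, hp]
          · -- line side
            cases line with
            | some l => simp
            | none =>
              by_cases hl : (c == '\n') = true <;> simp [pvA3, hg, hl]

-- ===== VERDICT (by name: the statement is the Claim_ definition above) =====
theorem find_sentence_break_py_spec : Claim_equal_find_sentence_break_py := by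
  intro text start end_ _ _
  unfold Spec_find_sentence_break_py find_sentence_break_py find_sentence_break_py_alt
  rw [pvBloop_eq]
  cases h1 : pvA1 text.toList (end_ - 1) (end_ - start).toNat with
  | some r => simp [h1]
  | none =>
    cases h2 : pvA2 text.toList (end_ - 1) (end_ - start).toNat with
    | some r => simp [h1, h2]
    | none =>
      cases h3 : pvA3 text.toList (end_ - 1) (end_ - start).toNat with
      | some r => simp [h1, h2, h3]
      | none => simp [h1, h2, h3]
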